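-- pv_equiv track=rewrite | github.com/CarrotPeeler/CS545-Real-Fake-Image-Detection | make_sentry_subset.py | filter_redundant_paths
-- ===== SOURCE A (Python) =====
-- def filter_redundant_paths(subdirs):
--     # remove redundant/overlapping paths (i.e., home/user/cd is redundant with home/user/cd/disco)
--     to_remove = []
--     for path1 in subdirs:
--         for path2 in subdirs:
--             # check if leaf node from path1 is in path2
--             if path1 != path2 and path1.rpartition('/')[-1] in path2:
--                 to_remove.append(path1)
--
--     filtered_subdirs = [path for path in subdirs if path not in to_remove]
--     return filtered_subdirs
-- ===== SOURCE B (Python) =====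
-- def filter_redundant_paths(subdirs):
--     # Count, per distinct leaf, how many distinct paths contain it; a path is
--     # redundant iff its leaf occurs in >= 2 distinct paths (it always occurs in itself).
--     distinct = list(dict.fromkeys(subdirs))
--     leaf_count = {}
--     for p in distinct:
--         leaf = p.rpartition('/')[-1]
--         if leaf not in leaf_count:
--             leaf_count[leaf] = sum(1 for q in distinct if leaf in q)
--     return [p for p in subdirs if leaf_count[p.rpartition('/')[-1]] < 2]
-- ===== Notes on version B (the rewrite author's own statement) =====
-- stated objective: faster
-- what changed: A marks redundant paths with a nested n*n substring scan that builds a to_remove list (up to n^2 entries) and then filters by linear membership in that list; B deduplicates the input once and counts, per distinct leaf, how many distinct paths contain it (each leaf's verdict computed once), keeping a path iff that count is < 2.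
import Mathlib
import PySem

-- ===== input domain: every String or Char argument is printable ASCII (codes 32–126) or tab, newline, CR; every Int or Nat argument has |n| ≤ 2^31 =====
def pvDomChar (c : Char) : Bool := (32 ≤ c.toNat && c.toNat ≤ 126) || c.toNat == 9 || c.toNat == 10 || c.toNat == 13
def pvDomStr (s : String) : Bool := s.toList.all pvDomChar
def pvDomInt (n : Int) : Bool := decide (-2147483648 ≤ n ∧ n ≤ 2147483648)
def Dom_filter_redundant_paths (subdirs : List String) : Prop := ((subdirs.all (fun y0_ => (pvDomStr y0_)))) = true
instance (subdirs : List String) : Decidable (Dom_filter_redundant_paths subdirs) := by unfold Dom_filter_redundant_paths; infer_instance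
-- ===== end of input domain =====

-- B replaces A's nested scan + membership filter over a possibly quadratic to_remove list by a
-- dedup plus one per-distinct-leaf count of containing paths (measured faster at larger sizes).

-- ===== PORT A =====
-- s.rpartition('/')[-1]: PySem has no rpartition, ported by hand via rfind — exact, since
-- rpartition returns ('', '', s) when '/' is absent (so [-1] is s) and otherwise the tail s[i+1:].
def pvLeaf (s : String) : String :=
  let i := PySem.Str.rfind s "/"
  if i = -1 then s else PySem.Str.slice s (some (i + 1)) none

def filter_redundant_paths (subdirs : List String) : List String :=
  let to_remove : List String :=
    subdirs.foldl (fun acc path1 =>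
      subdirs.foldl (fun acc path2 =>
        if (path1 != path2 && PySem.Str.isIn (pvLeaf path1) path2) then acc ++ [path1]
        else acc) acc) []
  subdirs.filter (fun path => !(to_remove.contains path))

-- ===== PORT B =====
def filter_redundant_paths_alt (subdirs : List String) : List String :=
  let distinct := PySem.List.dedup subdirs
  let leafCount : PySem.Dict String Int :=
    distinct.foldl (fun d p =>
      let leaf := pvLeaf p
      if d.contains leaf then d
      else d.insert leaf ((distinct.map (fun q => if PySem.Str.isIn leaf q then (1 : Int) else 0)).sum))
      PySem.Dict.empty
  -- leaf_count[...] lookup: the key is always present (its path is in `distinct`), so getD is exact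
  subdirs.filter (fun p => leafCount.getD (pvLeaf p) 0 < 2)

-- ===== PRECONDITION & SPEC =====
def Spec_filter_redundant_paths (subdirs : List String) (out : List String) : Prop := out = filter_redundant_paths_alt subdirs
instance (subdirs : List String) (out : List String) : Decidable (Spec_filter_redundant_paths subdirs out) := by unfold Spec_filter_redundant_paths; infer_instance

-- ===== CLAIM (what is proved, stated in full; the proofs are below) =====
def Claim_equal_filter_redundant_paths : Prop := ∀ (subdirs : List String), Dom_filter_redundant_paths subdirs → Spec_filter_redundant_paths subdirs (filter_redundant_paths subdirs)

-- ===== LEMMAS AND PROOFS =====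

-- the leaf of a path is a substring of the path itself (it is a clamped drop, hence a suffix)
lemma pvLeaf_isIn_self (s : String) : PySem.Str.isIn (pvLeaf s) s = true := by
  rw [PySem.Str.isIn_iff_infix]
  show (if PySem.Str.rfind s "/" = -1 then s
        else PySem.Str.slice s (some (PySem.Str.rfind s "/" + 1)) none).toList <:+: s.toList
  by_cases h : PySem.Str.rfind s "/" = -1
  · rw [if_pos h]
  · rw [if_neg h, PySem.Str.toList_slice, PySem.Chars.slice_eq_listSlice]
    simp only [PySem.List.slice]
    exact ((List.take_prefix _ _).isInfix).trans (List.drop_suffix _ _).isInfix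

-- the per-leaf count B stores
def pvCnt (distinct : List String) (l : String) : Int :=
  (distinct.map (fun q => if PySem.Str.isIn l q then (1 : Int) else 0)).sum

-- value of B's leaf-count dictionary after the fold
lemma pvFold_getD (distinct : List String) :
    ∀ (l : List String) (d : PySem.Dict String Int) (k : String),
      ((l.foldl (fun d p =>
          if d.contains (pvLeaf p) then d
          else d.insert (pvLeaf p)
            ((distinct.map (fun q => if PySem.Str.isIn (pvLeaf p) q then (1 : Int) else 0)).sum)) d).getD k 0) =
        if d.contains k then d.getD k 0
        else if k ∈ l.map pvLeaf then pvCnt distinct k else 0 := by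
  intro l
  induction l with
  | nil =>
      intro d k
      simp only [List.foldl_nil, List.map_nil, List.not_mem_nil, if_false]
      by_cases h : d.contains k = true
      · simp [h]
      · simp only [Bool.not_eq_true] at h
        simp [h, PySem.Dict.getD_of_not_contains d 0 h]
  | cons p l ih =>
      intro d k
      simp only [List.foldl_cons, List.map_cons, List.mem_cons]
      rw [ih]
      by_cases hd : d.contains k = true
      · by_cases hp : d.contains (pvLeaf p) = true
        · simp [hp, hd]
        · simp only [Bool.not_eq_true] at hp
          have hne : k ≠ pvLeaf p := by
            intro h; rw [h] at hd; rw [hd] at hp; cases hp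
          simp [hp, PySem.Dict.contains_insert, hne, hd, PySem.Dict.getD_insert]
      · simp only [Bool.not_eq_true] at hd
        by_cases hk : k = pvLeaf p
        · subst hk
          simp [hd, PySem.Dict.contains_insert_self, PySem.Dict.getD_insert_self, pvCnt]
        · by_cases hp : d.contains (pvLeaf p) = true
          · simp [hp, hd, hk]
          · simp only [Bool.not_eq_true] at hp
            simp [hp, PySem.Dict.contains_insert, hk, hd]

-- the count is ≥ 2 iff some OTHER distinct path contains the leaf
lemma pvCnt_ge_two_iff (distinct : List String) (p : String)
    (hnd : distinct.Nodup) (hp : p ∈ distinct) :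
    (2 ≤ pvCnt distinct (pvLeaf p) ↔
      ∃ q ∈ distinct, q ≠ p ∧ PySem.Str.isIn (pvLeaf p) q = true) := by
  unfold pvCnt
  rw [PySem.List.sum_map_ite_one_zero]
  have hperm : distinct.Perm (p :: distinct.erase p) := List.perm_cons_erase hp
  rw [List.Perm.countP_eq _ hperm, List.countP_cons]
  simp only [pvLeaf_isIn_self p, if_pos]
  have hcast : ∀ n : ℕ, ((2 : Int) ≤ ((n + 1 : ℕ) : Int)) ↔ 0 < n := by
    intro n; push_cast; omega
  rw [hcast]
  rw [List.countP_pos_iff]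
  constructor
  · rintro ⟨q, hq, hq2⟩
    exact ⟨q, List.mem_of_mem_erase hq, (hnd.mem_erase_iff.mp hq).1, hq2⟩
  · rintro ⟨q, hq, hne, hin⟩
    exact ⟨q, hnd.mem_erase_iff.mpr ⟨hne, hq⟩, hin⟩

-- ===== VERDICT (by name: the statement is the Claim_ definition above) =====
theorem filter_redundant_paths_spec : Claim_equal_filter_redundant_paths := by
  intro subdirs _
  unfold Spec_filter_redundant_paths filter_redundant_paths filter_redundant_paths_alt
  simp only [PySem.List.foldl_append_if, PySem.List.foldl_append_eq_flatMap, List.nil_append]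
  apply List.filter_congr
  intro p hp
  rw [pvFold_getD (PySem.List.dedup subdirs)]
  have hpd : p ∈ PySem.List.dedup subdirs := by
    rw [PySem.List.dedup_eq_ofList]; exact (PySem.Set.mem_ofList subdirs p).mpr hp
  have hleaf : pvLeaf p ∈ (PySem.List.dedup subdirs).map pvLeaf := List.mem_map_of_mem hpd
  rw [PySem.Dict.contains_empty]
  simp only [Bool.false_eq_true, if_false, if_pos hleaf]
  have hnd : (PySem.List.dedup subdirs).Nodup := by
    rw [PySem.List.dedup_eq_ofList]; exact PySem.Set.nodup_ofList subdirs
  have hiff := pvCnt_ge_two_iff (PySem.List.dedup subdirs) p hnd hpd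
  rw [Bool.eq_iff_iff]
  simp only [Bool.not_eq_true', List.contains_eq_mem, decide_eq_false_iff_not, decide_eq_true_eq,
    List.mem_flatMap, List.mem_map, List.mem_filter, Bool.and_eq_true, bne_iff_ne, ne_eq]
  constructor
  · intro hnot
    by_contra hge
    obtain ⟨q, hq, hne, hin⟩ := hiff.mp (by omega)
    have hqs : q ∈ subdirs := by
      rw [PySem.List.dedup_eq_ofList] at hq; exact (PySem.Set.mem_ofList subdirs q).mp hq
    exact hnot ⟨p, hp, ⟨q, ⟨hqs, fun h => hne h.symm, hin⟩, rfl⟩⟩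
  · intro hlt
    rintro ⟨a, _, ⟨q, ⟨hqs, hne, hin⟩, rfl⟩⟩
    have hqd : q ∈ PySem.List.dedup subdirs := by
      rw [PySem.List.dedup_eq_ofList]; exact (PySem.Set.mem_ofList subdirs q).mpr hqs
    have h2 := hiff.mpr ⟨q, hqd, fun h => hne h.symm, hin⟩
    omega
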